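-- pv_equiv track=rewrite | github.com/stamaimer/gol | gol_gui.py | get_around_index
-- ===== SOURCE A (Python) =====
-- def get_around_index(row, col, world_size):
--
--     """
--
--     获得一个细胞周围八个细胞的有效索引
--
--     :param row:
--     :param col:
--     :param world_size:
--     :return:
--     """
--
--     indices = [(row - 1, col - 1), (row - 1, col), (row - 1, col + 1),
--                (row, col - 1), (row, col + 1),
--                (row + 1, col - 1), (row + 1, col), (row + 1, col + 1)]
--
--     invalid_indices = [item for item in indices if item[0] == -1 or item[0] == world_size or
--                                                    item[1] == -1 or item[1] == world_size]
--
--     valid_indices = [item for item in indices if item not in invalid_indices]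
--
--     return valid_indices
-- ===== SOURCE B (Python) =====
-- def get_around_index(row, col, world_size):
--     """Separable validity: valid neighbors = (valid rows) x (valid cols) minus the center."""
--     def ok(x):
--         return x != -1 and x != world_size
--     rows = [r for r in (row - 1, row, row + 1) if ok(r)]
--     cols = [c for c in (col - 1, col, col + 1) if ok(c)]
--     return [(r, c) for r in rows for c in cols if r != row or c != col]
-- ===== Notes on version B (the rewrite author's own statement) =====
-- stated objective: simpler
-- what changed: Exploits separability of the validity test: instead of enumerating 8 candidate pairs, building an invalid sublist and filtering by membership, B filters the three row values and three col values independently and emits the Cartesian product of valid rows x valid cols, skipping the center cell.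
import Mathlib
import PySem

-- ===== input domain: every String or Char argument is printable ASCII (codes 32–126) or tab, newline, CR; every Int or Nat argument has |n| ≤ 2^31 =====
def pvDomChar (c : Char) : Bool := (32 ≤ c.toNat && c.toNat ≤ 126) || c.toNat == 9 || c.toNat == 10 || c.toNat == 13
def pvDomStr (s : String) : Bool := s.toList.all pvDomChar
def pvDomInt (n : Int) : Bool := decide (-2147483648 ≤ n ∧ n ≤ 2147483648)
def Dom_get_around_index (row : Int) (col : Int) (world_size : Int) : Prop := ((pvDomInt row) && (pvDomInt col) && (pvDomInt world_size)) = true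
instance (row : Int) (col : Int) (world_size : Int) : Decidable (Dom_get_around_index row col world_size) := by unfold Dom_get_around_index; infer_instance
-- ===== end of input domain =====

-- B replaces A's three-list pipeline (8 candidate pairs, invalid sublist, membership filter)
-- by a separable construction: Cartesian product of valid rows × valid cols minus the center;
-- objective: simpler.

-- ===== PORT A =====
def get_around_index (row : Int) (col : Int) (world_size : Int) : List (Int × Int) :=
  let indices : List (Int × Int) :=
    [(row - 1, col - 1), (row - 1, col), (row - 1, col + 1),
     (row, col - 1), (row, col + 1),
     (row + 1, col - 1), (row + 1, col), (row + 1, col + 1)]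
  let invalid_indices := indices.filter (fun item =>
    item.1 == -1 || item.1 == world_size || item.2 == -1 || item.2 == world_size)
  let valid_indices := indices.filter (fun item => !(invalid_indices.contains item))
  valid_indices

-- ===== PORT B =====
-- B's helper ok(x): a coordinate value is usable
def pvOk (world_size : Int) (x : Int) : Bool := x != -1 && x != world_size

def get_around_index_alt (row : Int) (col : Int) (world_size : Int) : List (Int × Int) :=
  let rows := [row - 1, row, row + 1].filter (pvOk world_size)
  let cols := [col - 1, col, col + 1].filter (pvOk world_size)
  rows.flatMap (fun r =>
    (cols.filter (fun c => !(r == row) || !(c == col))).map (fun c => (r, c)))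

-- ===== PRECONDITION & SPEC =====
def Spec_get_around_index (row : Int) (col : Int) (world_size : Int) (out : List (Int × Int)) : Prop := out = get_around_index_alt row col world_size
instance (row : Int) (col : Int) (world_size : Int) (out : List (Int × Int)) : Decidable (Spec_get_around_index row col world_size out) := by unfold Spec_get_around_index; infer_instance

-- ===== CLAIM (what is proved, stated in full; the proofs are below) =====
def Claim_equal_get_around_index : Prop := ∀ (row : Int) (col : Int) (world_size : Int), Dom_get_around_index row col world_size → Spec_get_around_index row col world_size (get_around_index row col world_size)

-- ===== LEMMAS AND PROOFS =====

-- The 8 candidates are pairwise distinct, so filtering by non-membership in the invalid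
-- sublist is the same as filtering by the negated invalidity test.
theorem pv_filter_not_mem_filter {α : Type} [BEq α] [LawfulBEq α] (l : List α) (p : α → Bool) :
    l.filter (fun x => !((l.filter p).contains x)) = l.filter (fun x => !(p x)) := by
  apply List.filter_congr
  intro x hx
  simp [hx]

theorem pv_main (row col world_size : Int) :
    get_around_index row col world_size = get_around_index_alt row col world_size := by
  unfold get_around_index get_around_index_alt
  dsimp only
  rw [pv_filter_not_mem_filter]
  have hA : ∀ item : Int × Int,
      (!(item.1 == -1 || item.1 == world_size || item.2 == -1 || item.2 == world_size))
        = (pvOk world_size item.1 && pvOk world_size item.2) := by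
    intro item; simp [pvOk, Bool.not_or, Bool.and_assoc, bne]
  simp only [hA]
  have e1 : ((row - 1 : Int) == row) = false := by simp
  have e2 : ((row + 1 : Int) == row) = false := by simp
  have e3 : ((col - 1 : Int) == col) = false := by simp
  have e4 : ((col + 1 : Int) == col) = false := by simp
  cases h1 : pvOk world_size (row - 1) <;> cases h2 : pvOk world_size row <;>
  cases h3 : pvOk world_size (row + 1) <;> cases h4 : pvOk world_size (col - 1) <;>
  cases h5 : pvOk world_size col <;> cases h6 : pvOk world_size (col + 1) <;>
    simp [List.filter, List.flatMap, h1, h2, h3, h4, h5, h6, e1, e2, e3, e4]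

-- ===== VERDICT (by name: the statement is the Claim_ definition above) =====
theorem get_around_index_spec : Claim_equal_get_around_index := by
  intro row col world_size _
  exact pv_main row col world_size
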